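-- pv_equiv track=rewrite | github.com/sandeepseth5/experiment | python/largest_x_new.py | traverse_from_bottom_right
-- ===== SOURCE A (Python) =====
-- def traverse_from_bottom_right(matrix, bottom_right):
--     for i in range(len(matrix)-1, -1, -1):
--         for j in range(len(matrix[0])-1, -1, -1):
--             if i == len(matrix) - 1 or j == len(matrix[0]) - 1:
--                 bottom_right[i][j] = matrix[i][j]
--             elif matrix[i][j] == 1 and bottom_right[i + 1][j + 1] > 0:
--                 bottom_right[i][j] = bottom_right[i + 1][j + 1] + 1
--             else:
--                 bottom_right[i][j] = matrix[i][j]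
--     return bottom_right
-- ===== SOURCE B (Python) =====
-- def traverse_from_bottom_right(matrix, bottom_right):
--     # Diagonal-walk decomposition: from each start cell on the bottom edge and
--     # the right edge, walk up-left carrying the value just written for the
--     # down-right neighbour, so no table read of bottom_right[i+1][j+1] is needed.
--     if not matrix or not matrix[0]:
--         return bottom_right
--     m, n = len(matrix), len(matrix[0])
--     starts = [(m - 1, j) for j in range(n)] + [(i, n - 1) for i in range(m - 1)]
--     for si, sj in starts:
--         i, j, prev = si, sj, 0
--         while True:
--             if i == m - 1 or j == n - 1:
--                 v = matrix[i][j]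
--             elif matrix[i][j] == 1 and prev > 0:
--                 v = prev + 1
--             else:
--                 v = matrix[i][j]
--             bottom_right[i][j] = v
--             prev = v
--             if i == 0 or j == 0:
--                 break
--             i -= 1
--             j -= 1
--     return bottom_right
-- ===== Notes on version B (the rewrite author's own statement) =====
-- stated objective: alternative
-- what changed: Replaces A's row-by-row bottom-up scan that reads the DP table at bottom_right[i+1][j+1] with independent walks up-left along each anti-ordered diagonal (started from the bottom edge and right edge), carrying the value just written in a scalar accumulator instead of re-reading the table.
import Mathlib
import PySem

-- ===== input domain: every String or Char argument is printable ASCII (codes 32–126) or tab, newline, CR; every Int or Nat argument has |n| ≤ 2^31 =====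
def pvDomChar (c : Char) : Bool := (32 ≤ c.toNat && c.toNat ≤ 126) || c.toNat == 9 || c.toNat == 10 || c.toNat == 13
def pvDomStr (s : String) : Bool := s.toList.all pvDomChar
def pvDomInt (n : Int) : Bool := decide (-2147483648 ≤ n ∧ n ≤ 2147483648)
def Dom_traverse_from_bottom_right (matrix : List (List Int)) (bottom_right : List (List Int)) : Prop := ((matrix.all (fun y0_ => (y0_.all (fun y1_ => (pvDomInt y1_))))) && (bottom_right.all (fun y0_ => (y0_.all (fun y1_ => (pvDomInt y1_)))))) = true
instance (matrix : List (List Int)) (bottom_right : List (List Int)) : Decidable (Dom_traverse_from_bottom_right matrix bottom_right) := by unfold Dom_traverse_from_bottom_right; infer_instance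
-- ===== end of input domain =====

-- B replaces A's row-by-row scan (reading the DP table at [i+1][j+1]) with walks
-- up-left along each diagonal carrying the last written value in an accumulator
-- (objective: alternative decomposition; same in-place mutation as A, equivalence
-- proved about the return value).

-- shared 2D read/write helpers (Python's g[i][j] access / assignment; all
-- accesses are in range on inputs admitted by Pre_, where getD's default is unused)
def pvRead (g : List (List Int)) (i j : Nat) : Int := (g.getD i []).getD j 0
def pvSet2d (g : List (List Int)) (i j : Nat) (v : Int) : List (List Int) :=
  g.set i ((g.getD i []).set j v)

-- ===== PORT A =====
-- body of A's inner loop for cell (i, j)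
def pvAStep (matrix : List (List Int)) (m n i j : Nat) (g : List (List Int)) : List (List Int) :=
  if i = m - 1 ∨ j = n - 1 then pvSet2d g i j (pvRead matrix i j)
  else if pvRead matrix i j = 1 ∧ 0 < pvRead g (i + 1) (j + 1) then
    pvSet2d g i j (pvRead g (i + 1) (j + 1) + 1)
  else pvSet2d g i j (pvRead matrix i j)

-- `for j in range(len(matrix[0])-1, -1, -1)`: process j = c-1, c-2, …, 0
def pvACols (matrix : List (List Int)) (m n i : Nat) : Nat → List (List Int) → List (List Int)
  | 0, g => g
  | c + 1, g => pvACols matrix m n i c (pvAStep matrix m n i c g)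

-- `for i in range(len(matrix)-1, -1, -1)`: process i = k-1, k-2, …, 0
def pvARows (matrix : List (List Int)) (m n : Nat) : Nat → List (List Int) → List (List Int)
  | 0, g => g
  | k + 1, g => pvARows matrix m n k (pvACols matrix m n k n g)

def traverse_from_bottom_right (matrix : List (List Int)) (bottom_right : List (List Int)) : List (List Int) :=
  pvARows matrix matrix.length ((matrix.headD []).length) matrix.length bottom_right

-- ===== PORT B =====
-- the three-way branch computing the value for cell (i, j) from the accumulator
def pvBVal (matrix : List (List Int)) (m n i j : Nat) (prev : Int) : Int :=
  if i = m - 1 ∨ j = n - 1 then pvRead matrix i j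
  else if pvRead matrix i j = 1 ∧ 0 < prev then prev + 1
  else pvRead matrix i j

-- B's inner `while True` loop: walk up-left from (i, j), prev = value written down-right
def pvWalk (matrix : List (List Int)) (m n : Nat) (i j : Nat) (prev : Int)
    (g : List (List Int)) : List (List Int) :=
  let v := pvBVal matrix m n i j prev
  let g' := pvSet2d g i j v
  if h : i = 0 ∨ j = 0 then g'
  else pvWalk matrix m n (i - 1) (j - 1) v g'
termination_by i
decreasing_by omega

def traverse_from_bottom_right_alt (matrix : List (List Int)) (bottom_right : List (List Int)) : List (List Int) :=
  if matrix = [] ∨ matrix.headD [] = [] then bottom_right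
  else
    let m := matrix.length
    let n := (matrix.headD []).length
    let starts := (List.range n).map (fun j => (m - 1, j)) ++ (List.range (m - 1)).map (fun i => (i, n - 1))
    starts.foldl (fun g s => pvWalk matrix m n s.1 s.2 0 g) bottom_right

-- ===== PRECONDITION & SPEC =====
-- Pre_ excludes exactly the inputs where Python A raises an IndexError: when the
-- matrix has a nonempty first row, every matrix row must reach that width, and
-- bottom_right must have at least as many rows as matrix, each of the first
-- len(matrix) of them at least as wide as matrix[0].
def Pre_traverse_from_bottom_right (matrix : List (List Int)) (bottom_right : List (List Int)) : Prop :=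
  (matrix.headD []).length = 0 ∨
    ((∀ row ∈ matrix, (matrix.headD []).length ≤ row.length) ∧
      matrix.length ≤ bottom_right.length ∧
      ∀ r < matrix.length, (matrix.headD []).length ≤ (bottom_right.getD r []).length)
instance (matrix : List (List Int)) (bottom_right : List (List Int)) : Decidable (Pre_traverse_from_bottom_right matrix bottom_right) := by unfold Pre_traverse_from_bottom_right; infer_instance

def pvWitness_traverse_from_bottom_right : List (List Int) × List (List Int) :=
  ([[1, 1], [1, 1]], [[0, 0], [0, 0]])

def Spec_traverse_from_bottom_right (matrix : List (List Int)) (bottom_right : List (List Int)) (out : List (List Int)) : Prop := out = traverse_from_bottom_right_alt matrix bottom_right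
instance (matrix : List (List Int)) (bottom_right : List (List Int)) (out : List (List Int)) : Decidable (Spec_traverse_from_bottom_right matrix bottom_right out) := by unfold Spec_traverse_from_bottom_right; infer_instance

-- ===== CLAIM (what is proved, stated in full; the proofs are below) =====
def Claim_equal_traverse_from_bottom_right : Prop := ∀ (matrix : List (List Int)) (bottom_right : List (List Int)), Dom_traverse_from_bottom_right matrix bottom_right → Pre_traverse_from_bottom_right matrix bottom_right → Spec_traverse_from_bottom_right matrix bottom_right (traverse_from_bottom_right matrix bottom_right)


-- ===== LEMMAS AND PROOFS =====

-- generic getD facts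
theorem pvGetD_set {α : Type} (l : List α) (i j : Nat) (v d : α) :
    (l.set i v).getD j d = if i = j ∧ j < l.length then v else l.getD j d := by
  simp only [List.getD, List.getElem?_set]
  split_ifs <;> simp_all

theorem pvGetD_eq {α : Type} (l : List α) (j : Nat) (d : α) (h : j < l.length) :
    l.getD j d = l[j] := by
  simp [List.getD, List.getElem?_eq_getElem h]

-- the common DP value of cell (i, j), defined with fuel (call with fuel = m - i)
def pvTab (matrix : List (List Int)) (m n : Nat) : Nat → Nat → Nat → Int
  | 0, _, _ => 0
  | fuel + 1, i, j =>
    if i = m - 1 ∨ j = n - 1 then pvRead matrix i j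
    else if pvRead matrix i j = 1 ∧ 0 < pvTab matrix m n fuel (i + 1) (j + 1) then
      pvTab matrix m n fuel (i + 1) (j + 1) + 1
    else pvRead matrix i j

def pvF (matrix : List (List Int)) (m n i j : Nat) : Int := pvTab matrix m n (m - i) i j

theorem pvTab_fuel (matrix : List (List Int)) (m n : Nat) :
    ∀ f1 f2 i j, i < m → m - i ≤ f1 → m - i ≤ f2 →
      pvTab matrix m n f1 i j = pvTab matrix m n f2 i j := by
  intro f1
  induction f1 with
  | zero => intro f2 i j him h1 h2; omega
  | succ f1 ih =>
    intro f2 i j him h1 h2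
    obtain ⟨f2', rfl⟩ : ∃ k, f2 = k + 1 := ⟨f2 - 1, by omega⟩
    simp only [pvTab]
    by_cases hc : i = m - 1 ∨ j = n - 1
    · simp [hc]
    · have hlt : i < m - 1 := by omega
      simp only [if_neg hc]
      rw [ih f2' (i + 1) (j + 1) (by omega) (by omega) (by omega)]

theorem pvF_eq (matrix : List (List Int)) (m n i j : Nat) (him : i < m) :
    pvF matrix m n i j =
      if i = m - 1 ∨ j = n - 1 then pvRead matrix i j
      else if pvRead matrix i j = 1 ∧ 0 < pvF matrix m n (i + 1) (j + 1) then
        pvF matrix m n (i + 1) (j + 1) + 1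
      else pvRead matrix i j := by
  unfold pvF
  have hmi : m - i = (m - i - 1) + 1 := by omega
  rw [hmi]
  simp only [pvTab]
  by_cases hc : i = m - 1 ∨ j = n - 1
  · simp [hc]
  · have hlt : i < m - 1 := by omega
    rw [pvTab_fuel matrix m n (m - i - 1) (m - (i + 1)) (i + 1) (j + 1) (by omega) (by omega) (by omega)]

-- basic facts about pvSet2d / pvRead
theorem pvSet2d_length (g : List (List Int)) (i j : Nat) (v : Int) :
    (pvSet2d g i j v).length = g.length := by
  simp [pvSet2d]

theorem pvSet2d_rowLen (g : List (List Int)) (i j : Nat) (v : Int) (r : Nat) :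
    ((pvSet2d g i j v).getD r []).length = (g.getD r []).length := by
  unfold pvSet2d
  rw [pvGetD_set]
  split_ifs with h
  · rw [List.length_set, h.1]
  · rfl

theorem pvRead_set2d_self (g : List (List Int)) (i j : Nat) (v : Int)
    (hi : i < g.length) (hj : j < (g.getD i []).length) :
    pvRead (pvSet2d g i j v) i j = v := by
  unfold pvRead pvSet2d
  rw [pvGetD_set, if_pos ⟨rfl, hi⟩, pvGetD_set, if_pos ⟨rfl, hj⟩]

theorem pvRead_set2d_other (g : List (List Int)) (i j : Nat) (v : Int) (r c : Nat)
    (h : r ≠ i ∨ c ≠ j) :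
    pvRead (pvSet2d g i j v) r c = pvRead g r c := by
  unfold pvRead pvSet2d
  rw [pvGetD_set]
  split_ifs with h1
  · obtain ⟨rfl, -⟩ := h1
    rw [pvGetD_set]
    split_ifs with h2
    · rcases h with h | h
      · exact absurd rfl h
      · exact absurd h2.1 (Ne.symm h)
    · rfl
  · rfl

-- grids are equal once lengths, row lengths and all reads agree
theorem pvGrid_ext (g1 g2 : List (List Int))
    (hlen : g1.length = g2.length)
    (hrow : ∀ r, (g1.getD r []).length = (g2.getD r []).length)
    (hread : ∀ r c, pvRead g1 r c = pvRead g2 r c) : g1 = g2 := by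
  apply List.ext_getElem hlen
  intro r hr1 hr2
  have hrowr := hrow r
  rw [pvGetD_eq g1 r [] hr1, pvGetD_eq g2 r [] hr2] at hrowr
  apply List.ext_getElem hrowr
  intro c hc1 hc2
  have hrd := hread r c
  unfold pvRead at hrd
  rw [pvGetD_eq g1 r [] hr1, pvGetD_eq g2 r [] hr2] at hrd
  rwa [pvGetD_eq _ c 0 hc1, pvGetD_eq _ c 0 hc2] at hrd

-- ===== A side =====

theorem pvAStep_spec (matrix : List (List Int)) (m n k c : Nat) (g : List (List Int))
    (hk : k < m) (hc : c < n)
    (hlen : m ≤ g.length) (hrow : n ≤ (g.getD k []).length)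
    (hup : k + 1 < m → c + 1 < n → pvRead g (k + 1) (c + 1) = pvF matrix m n (k + 1) (c + 1)) :
    (pvAStep matrix m n k c g).length = g.length ∧
    (∀ r, ((pvAStep matrix m n k c g).getD r []).length = (g.getD r []).length) ∧
    (pvRead (pvAStep matrix m n k c g) k c = pvF matrix m n k c) ∧
    (∀ r j, ¬(r = k ∧ j = c) → pvRead (pvAStep matrix m n k c g) r j = pvRead g r j) := by
  have hkg : k < g.length := by omega
  have hcg : c < (g.getD k []).length := by omega
  have hother : ∀ (v : Int) (r j : Nat), ¬(r = k ∧ j = c) →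
      pvRead (pvSet2d g k c v) r j = pvRead g r j := by
    intro v r j h
    apply pvRead_set2d_other
    by_cases hr : r = k
    · right; intro hj; exact h ⟨hr, hj⟩
    · left; exact hr
  unfold pvAStep
  rw [pvF_eq matrix m n k c hk]
  by_cases h1 : k = m - 1 ∨ c = n - 1
  · simp only [if_pos h1]
    exact ⟨pvSet2d_length .., fun r => pvSet2d_rowLen .., pvRead_set2d_self g k c _ hkg hcg,
      fun r j h => hother _ r j h⟩
  · have hk1 : k + 1 < m := by omega
    have hc1 : c + 1 < n := by omega
    rw [hup hk1 hc1]
    simp only [if_neg h1]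
    by_cases h2 : pvRead matrix k c = 1 ∧ 0 < pvF matrix m n (k + 1) (c + 1)
    · simp only [if_pos h2]
      exact ⟨pvSet2d_length .., fun r => pvSet2d_rowLen .., pvRead_set2d_self g k c _ hkg hcg,
        fun r j h => hother _ r j h⟩
    · simp only [if_neg h2]
      exact ⟨pvSet2d_length .., fun r => pvSet2d_rowLen .., pvRead_set2d_self g k c _ hkg hcg,
        fun r j h => hother _ r j h⟩

theorem pvACols_spec (matrix : List (List Int)) (m n k : Nat) :
    ∀ c g, c ≤ n → k < m → m ≤ g.length → (∀ r, r < m → n ≤ (g.getD r []).length) →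
    (∀ r j, k < r → r < m → j < n → pvRead g r j = pvF matrix m n r j) →
    (pvACols matrix m n k c g).length = g.length ∧
    (∀ r, ((pvACols matrix m n k c g).getD r []).length = (g.getD r []).length) ∧
    (∀ j, j < c → pvRead (pvACols matrix m n k c g) k j = pvF matrix m n k j) ∧
    (∀ r j, ¬(r = k ∧ j < c) → pvRead (pvACols matrix m n k c g) r j = pvRead g r j) := by
  intro c
  induction c with
  | zero => intro g _ _ _ _ _; exact ⟨rfl, fun r => rfl, fun j hj => absurd hj (by omega),
      fun r j _ => rfl⟩
  | succ c ih =>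
    intro g hcn hk hlen hrows hread
    have hstep := pvAStep_spec matrix m n k c g hk (by omega) hlen (hrows k hk)
      (fun h1 h2 => hread (k + 1) (c + 1) (by omega) h1 h2)
    obtain ⟨hl1, hr1, hself1, hoth1⟩ := hstep
    set g1 := pvAStep matrix m n k c g with hg1
    have ihh := ih g1 (by omega) hk (by omega)
      (fun r hr => by rw [hr1]; exact hrows r hr)
      (fun r j h1 h2 h3 => by
        rw [hoth1 r j (by intro hh; omega)]; exact hread r j h1 h2 h3)
    obtain ⟨hl2, hr2, hself2, hoth2⟩ := ihh
    refine ⟨by rw [show pvACols matrix m n k (c+1) g = pvACols matrix m n k c g1 from rfl, hl2, hl1],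
      fun r => by rw [show pvACols matrix m n k (c+1) g = pvACols matrix m n k c g1 from rfl, hr2, hr1],
      ?_, ?_⟩
    · intro j hj
      rw [show pvACols matrix m n k (c+1) g = pvACols matrix m n k c g1 from rfl]
      by_cases hjc : j < c
      · exact hself2 j hjc
      · have hjc' : j = c := by omega
        subst hjc'
        rw [hoth2 k j (by omega)]
        exact hself1
    · intro r j h
      rw [show pvACols matrix m n k (c+1) g = pvACols matrix m n k c g1 from rfl]
      rw [hoth2 r j (by intro hh; exact h ⟨hh.1, by omega⟩)]
      exact hoth1 r j (by intro hh; exact h ⟨hh.1, by omega⟩)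

theorem pvARows_spec (matrix : List (List Int)) (m n : Nat) :
    ∀ k g, k ≤ m → m ≤ g.length → (∀ r, r < m → n ≤ (g.getD r []).length) →
    (∀ r j, k ≤ r → r < m → j < n → pvRead g r j = pvF matrix m n r j) →
    (pvARows matrix m n k g).length = g.length ∧
    (∀ r, ((pvARows matrix m n k g).getD r []).length = (g.getD r []).length) ∧
    (∀ r j, r < m → j < n → pvRead (pvARows matrix m n k g) r j = pvF matrix m n r j) ∧
    (∀ r j, ¬(r < m ∧ j < n) → pvRead (pvARows matrix m n k g) r j = pvRead g r j) := by
  intro k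
  induction k with
  | zero =>
    intro g hkm hlen hrows hread
    exact ⟨rfl, fun r => rfl, fun r j h1 h2 => hread r j (by omega) h1 h2, fun r j _ => rfl⟩
  | succ k ih =>
    intro g hkm hlen hrows hread
    have hcols := pvACols_spec matrix m n k n g (le_refl n) (by omega) hlen hrows
      (fun r j h1 h2 h3 => hread r j (by omega) h2 h3)
    obtain ⟨hl1, hr1, hself1, hoth1⟩ := hcols
    set g1 := pvACols matrix m n k n g with hg1
    have ihh := ih g1 (by omega) (by omega)
      (fun r hr => by rw [hr1]; exact hrows r hr)
      (fun r j h1 h2 h3 => by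
        by_cases hrk : r = k
        · subst hrk; exact hself1 j h3
        · rw [hoth1 r j (by intro hh; exact hrk hh.1)]
          exact hread r j (by omega) h2 h3)
    obtain ⟨hl2, hr2, hself2, hoth2⟩ := ihh
    refine ⟨by rw [show pvARows matrix m n (k+1) g = pvARows matrix m n k g1 from rfl, hl2, hl1],
      fun r => by rw [show pvARows matrix m n (k+1) g = pvARows matrix m n k g1 from rfl, hr2, hr1],
      fun r j h1 h2 => by
        rw [show pvARows matrix m n (k+1) g = pvARows matrix m n k g1 from rfl]
        exact hself2 r j h1 h2,
      fun r j h => by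
        rw [show pvARows matrix m n (k+1) g = pvARows matrix m n k g1 from rfl]
        rw [hoth2 r j h]
        exact hoth1 r j (by intro hh; exact h ⟨by omega, hh.2⟩)⟩

theorem pvARows_n0 (matrix : List (List Int)) (m : Nat) :
    ∀ k g, pvARows matrix m 0 k g = g := by
  intro k
  induction k with
  | zero => intro g; rfl
  | succ k ih => intro g; exact ih g

-- ===== B side =====

theorem pvWalk_spec (matrix : List (List Int)) (m n : Nat) :
    ∀ i j (prev : Int) g, i < m → j < n → m ≤ g.length →
    (∀ r, r < m → n ≤ (g.getD r []).length) →
    ((i = m - 1 ∨ j = n - 1) ∨ prev = pvF matrix m n (i + 1) (j + 1)) →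
    (pvWalk matrix m n i j prev g).length = g.length ∧
    (∀ r, ((pvWalk matrix m n i j prev g).getD r []).length = (g.getD r []).length) ∧
    (∀ r c, r ≤ i → c ≤ j → i - r = j - c →
      pvRead (pvWalk matrix m n i j prev g) r c = pvF matrix m n r c) ∧
    (∀ r c, ¬(r ≤ i ∧ c ≤ j ∧ i - r = j - c) →
      pvRead (pvWalk matrix m n i j prev g) r c = pvRead g r c) := by
  intro i
  induction i using Nat.strong_induction_on with
  | _ i ih =>
    intro j prev g him hjn hlen hrows hprev
    have hv : pvBVal matrix m n i j prev = pvF matrix m n i j := by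
      rw [pvF_eq matrix m n i j him]
      unfold pvBVal
      by_cases h1 : i = m - 1 ∨ j = n - 1
      · simp [h1]
      · rcases hprev with hp | hp
        · exact absurd hp h1
        · rw [hp]
    rw [pvWalk]
    simp only [hv]
    have hig : i < g.length := by omega
    have hjg : j < (g.getD i []).length := by have := hrows i him; omega
    by_cases h0 : i = 0 ∨ j = 0
    · simp only [dif_pos h0]
      refine ⟨pvSet2d_length .., fun r => pvSet2d_rowLen .., ?_, ?_⟩
      · intro r c hr hc hd
        have : r = i ∧ c = j := by omega
        obtain ⟨rfl, rfl⟩ := this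
        exact pvRead_set2d_self g r c _ hig hjg
      · intro r c h
        apply pvRead_set2d_other
        by_cases hr : r = i
        · right; intro hc; subst hr hc; exact h ⟨le_refl _, le_refl _, by omega⟩
        · left; exact hr
    · simp only [dif_neg h0]
      have hi0 : 0 < i := by omega
      have hj0 : 0 < j := by omega
      set g1 := pvSet2d g i j (pvF matrix m n i j) with hg1
      have hsucc1 : i - 1 + 1 = i := by omega
      have hsucc2 : j - 1 + 1 = j := by omega
      have ihh := ih (i - 1) (by omega) (j - 1) (pvF matrix m n i j) g1 (by omega) (by omega)
        (by rw [pvSet2d_length]; exact hlen)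
        (fun r hr => by rw [pvSet2d_rowLen]; exact hrows r hr)
        (Or.inr (by rw [hsucc1, hsucc2]))
      obtain ⟨hl2, hr2, hself2, hoth2⟩ := ihh
      refine ⟨by rw [hl2, pvSet2d_length], fun r => by rw [hr2, pvSet2d_rowLen], ?_, ?_⟩
      · intro r c hr hc hd
        by_cases hri : r = i
        · have hcj : c = j := by omega
          subst hri hcj
          rw [hoth2 r c (by omega)]
          exact pvRead_set2d_self g r c _ hig hjg
        · have h1 : r ≤ i - 1 := by omega
          have h2 : c ≤ j - 1 := by omega
          exact hself2 r c h1 h2 (by omega)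
      · intro r c h
        rw [hoth2 r c (by intro hh; exact h ⟨by omega, by omega, by omega⟩)]
        exact pvRead_set2d_other g i j _ r c
          (by
            by_cases hr : r = i
            · right; intro hc; subst hr hc; exact h ⟨le_refl _, le_refl _, by omega⟩
            · left; exact hr)

def pvCovers (S : List (Nat × Nat)) (r c : Nat) : Prop :=
  ∃ s ∈ S, r ≤ s.1 ∧ c ≤ s.2 ∧ s.1 - r = s.2 - c

theorem pvFold_spec (matrix : List (List Int)) (m n : Nat) :
    ∀ (S : List (Nat × Nat)) g,
    (∀ s ∈ S, s.1 < m ∧ s.2 < n ∧ (s.1 = m - 1 ∨ s.2 = n - 1)) →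
    m ≤ g.length → (∀ r, r < m → n ≤ (g.getD r []).length) →
    (S.foldl (fun g s => pvWalk matrix m n s.1 s.2 0 g) g).length = g.length ∧
    (∀ r, (((S.foldl (fun g s => pvWalk matrix m n s.1 s.2 0 g) g)).getD r []).length = (g.getD r []).length) ∧
    (∀ r c, pvCovers S r c →
      pvRead (S.foldl (fun g s => pvWalk matrix m n s.1 s.2 0 g) g) r c = pvF matrix m n r c) ∧
    (∀ r c, ¬ pvCovers S r c →
      pvRead (S.foldl (fun g s => pvWalk matrix m n s.1 s.2 0 g) g) r c = pvRead g r c) := by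
  intro S
  induction S with
  | nil =>
    intro g _ _ _
    exact ⟨rfl, fun r => rfl, fun r c hc => absurd hc (by simp [pvCovers]), fun r c _ => rfl⟩
  | cons s S ih =>
    intro g hok hlen hrows
    obtain ⟨hs1, hs2, hs3⟩ := hok s (List.mem_cons_self)
    have hw := pvWalk_spec matrix m n s.1 s.2 0 g hs1 hs2 hlen hrows (Or.inl hs3)
    obtain ⟨hl1, hr1, hself1, hoth1⟩ := hw
    set g1 := pvWalk matrix m n s.1 s.2 0 g with hg1
    have ihh := ih g1 (fun t ht => hok t (List.mem_cons_of_mem s ht)) (by omega)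
      (fun r hr => by rw [hr1]; exact hrows r hr)
    obtain ⟨hl2, hr2, hself2, hoth2⟩ := ihh
    have hfold : (s :: S).foldl (fun g s => pvWalk matrix m n s.1 s.2 0 g) g
        = S.foldl (fun g s => pvWalk matrix m n s.1 s.2 0 g) g1 := rfl
    refine ⟨by rw [hfold, hl2, hl1], fun r => by rw [hfold, hr2, hr1], ?_, ?_⟩
    · intro r c hc
      rw [hfold]
      by_cases hcs : pvCovers S r c
      · exact hself2 r c hcs
      · rw [hoth2 r c hcs]
        obtain ⟨t, ht, h1, h2, h3⟩ := hc
        rcases List.mem_cons.mp ht with rfl | ht'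
        · exact hself1 r c h1 h2 h3
        · exact absurd ⟨t, ht', h1, h2, h3⟩ hcs
    · intro r c hc
      rw [hfold]
      rw [hoth2 r c (fun ⟨t, ht, hh⟩ => hc ⟨t, List.mem_cons_of_mem s ht, hh⟩)]
      exact hoth1 r c (fun ⟨h1, h2, h3⟩ => hc ⟨s, List.mem_cons_self, h1, h2, h3⟩)

theorem pvCovers_starts (m n : Nat) (hm : 0 < m) (hn : 0 < n) (r c : Nat) :
    pvCovers ((List.range n).map (fun j => (m - 1, j)) ++ (List.range (m - 1)).map (fun i => (i, n - 1))) r c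
    ↔ (r < m ∧ c < n) := by
  constructor
  · rintro ⟨s, hs, h1, h2, h3⟩
    rcases List.mem_append.mp hs with hs' | hs'
    · obtain ⟨j, hj, rfl⟩ := List.mem_map.mp hs'
      rw [List.mem_range] at hj
      constructor <;> omega
    · obtain ⟨i, hi, rfl⟩ := List.mem_map.mp hs'
      rw [List.mem_range] at hi
      constructor <;> omega
  · rintro ⟨h1, h2⟩
    by_cases hd : m - 1 - r ≤ n - 1 - c
    · refine ⟨(m - 1, c + (m - 1 - r)), List.mem_append.mpr (Or.inl ?_), by omega, by omega, by omega⟩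
      exact List.mem_map.mpr ⟨c + (m - 1 - r), List.mem_range.mpr (by omega), rfl⟩
    · refine ⟨(r + (n - 1 - c), n - 1), List.mem_append.mpr (Or.inr ?_), by omega, by omega, by omega⟩
      exact List.mem_map.mpr ⟨r + (n - 1 - c), List.mem_range.mpr (by omega), rfl⟩

-- ===== main proof =====

theorem traverse_from_bottom_right_spec : Claim_equal_traverse_from_bottom_right := by
  intro matrix br _ hpre
  unfold Spec_traverse_from_bottom_right
  by_cases hn0 : (matrix.headD []).length = 0
  · -- n = 0: both sides leave bottom_right untouched
    unfold traverse_from_bottom_right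
    rw [hn0, pvARows_n0]
    unfold traverse_from_bottom_right_alt
    rw [if_pos (Or.inr (List.length_eq_zero_iff.mp hn0))]
  · -- main case: m > 0, n > 0
    rcases hpre with hpre | ⟨-, hbr1, hbr2⟩
    · exact absurd hpre hn0
    set m := matrix.length with hm
    set n := (matrix.headD []).length with hn
    have hm0 : 0 < m := by
      rcases matrix with _ | ⟨row, rest⟩
      · simp [hn] at hn0
      · simp [hm]
    have hn0' : 0 < n := by omega
    have hrowsbr : ∀ r, r < m → n ≤ (br.getD r []).length := hbr2
    -- A side
    have hA := pvARows_spec matrix m n m br (le_refl m) hbr1 hrowsbr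
      (fun r j h1 h2 _ => by omega)
    obtain ⟨hAl, hAr, hAself, hAoth⟩ := hA
    -- B side
    have hmatne : ¬(matrix = [] ∨ matrix.headD [] = []) := by
      rintro (h | h)
      · subst h; simp [hm] at hm0
      · exact hn0 (by rw [hn, h]; rfl)
    have hSok : ∀ s ∈ (List.range n).map (fun j => (m - 1, j)) ++ (List.range (m - 1)).map (fun i => (i, n - 1)),
        s.1 < m ∧ s.2 < n ∧ (s.1 = m - 1 ∨ s.2 = n - 1) := by
      intro s hs
      rcases List.mem_append.mp hs with hs' | hs'
      · obtain ⟨j, hj, rfl⟩ := List.mem_map.mp hs'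
        rw [List.mem_range] at hj
        exact ⟨by omega, hj, Or.inl rfl⟩
      · obtain ⟨i, hi, rfl⟩ := List.mem_map.mp hs'
        rw [List.mem_range] at hi
        exact ⟨by omega, by omega, Or.inr rfl⟩
    have hB := pvFold_spec matrix m n
      ((List.range n).map (fun j => (m - 1, j)) ++ (List.range (m - 1)).map (fun i => (i, n - 1)))
      br hSok hbr1 hrowsbr
    obtain ⟨hBl, hBr, hBself, hBoth⟩ := hB
    have hBeq : traverse_from_bottom_right_alt matrix br =
        ((List.range n).map (fun j => (m - 1, j)) ++ (List.range (m - 1)).map (fun i => (i, n - 1))).foldl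
          (fun g s => pvWalk matrix m n s.1 s.2 0 g) br := by
      unfold traverse_from_bottom_right_alt
      rw [if_neg hmatne]
    have hAeq : traverse_from_bottom_right matrix br = pvARows matrix m n m br := rfl
    rw [hAeq, hBeq]
    apply pvGrid_ext
    · rw [hAl, hBl]
    · intro r; rw [hAr, hBr]
    · intro r c
      by_cases hin : r < m ∧ c < n
      · rw [hAself r c hin.1 hin.2,
          hBself r c ((pvCovers_starts m n hm0 hn0' r c).mpr hin)]
      · rw [hAoth r c hin,
          hBoth r c (fun hc => hin ((pvCovers_starts m n hm0 hn0' r c).mp hc))]
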